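-- pv_equiv track=rewrite | github.com/xingcdev/efrei-python-graphes | src/points_entree_sortie.py | get_entree_unique
-- ===== SOURCE A (Python) =====
-- CAR_VIDE = None
--
-- def get_entree_unique(mat_adj):
--     entree = None
--
--     # Recherche de sommets sans prédécesseurs
--     for sommet in range(0, len(mat_adj)):
--         if ([col[sommet] for col in mat_adj].count(CAR_VIDE)) == len(mat_adj):
--             # si une entrée a déjà été trouvée : pas d'unicité
--             if entree is not None:
--                 return None
--             # sinon, on la stocke
--             entree = sommet
--     return entree
-- ===== SOURCE B (Python) =====
-- CAR_VIDE = None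
--
-- def get_entree_unique(mat_adj):
--     n = len(mat_adj)
--     has_pred = set()
--     for row in mat_adj:
--         for j in range(n):
--             if row[j] != CAR_VIDE:
--                 has_pred.add(j)
--     sources = [j for j in range(n) if j not in has_pred]
--     return sources[0] if len(sources) == 1 else None
-- ===== Notes on version B (the rewrite author's own statement) =====
-- stated objective: alternative
-- what changed: Replaces A's per-vertex column scans (a fresh column list built and counted for every vertex) by one row-major pass collecting the set of vertices that have a predecessor, then a single comprehension over the vertices with an arity test instead of A's early-return accumulator.
-- outside the precondition, e.g. on get_entree_unique([[None, None], [None, None], [None, None]]): A returns None, B raises IndexError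
import Mathlib
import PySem

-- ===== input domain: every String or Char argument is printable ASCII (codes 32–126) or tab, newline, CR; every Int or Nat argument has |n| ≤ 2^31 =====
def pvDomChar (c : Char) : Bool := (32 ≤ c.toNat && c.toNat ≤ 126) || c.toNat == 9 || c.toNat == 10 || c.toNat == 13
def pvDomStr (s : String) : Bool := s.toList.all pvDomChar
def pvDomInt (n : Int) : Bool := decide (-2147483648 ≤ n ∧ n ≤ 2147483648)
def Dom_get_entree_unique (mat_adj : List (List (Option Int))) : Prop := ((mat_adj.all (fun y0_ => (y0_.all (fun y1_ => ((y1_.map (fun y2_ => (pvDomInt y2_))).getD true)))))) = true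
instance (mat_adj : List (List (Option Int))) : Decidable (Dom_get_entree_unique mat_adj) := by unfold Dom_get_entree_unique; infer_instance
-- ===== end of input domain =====

-- B replaces A's per-vertex column scans by one row-major pass collecting the
-- predecessor set plus a single arity check on the list of sources (objective: alternative algorithm, same cost).

-- ===== PORT A =====
-- condition of A's if: the column of 'sommet' counts len(mat_adj) occurrences of CAR_VIDE (= none).
-- col[sommet] is ported as pyGetD (exact under Pre_, which guarantees the index is in range).
def gA_cond (mat_adj : List (List (Option Int))) (sommet : Int) : Bool :=
  (mat_adj.map (fun col => PySem.List.pyGetD col sommet none)).count none == mat_adj.length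

-- A's loop over the vertices with the early 'return None' modelled by returning none without recursing.
def gA_loop (mat_adj : List (List (Option Int))) : List Int → Option Int → Option Int
  | [], entree => entree
  | sommet :: rest, entree =>
    if gA_cond mat_adj sommet then
      if entree ≠ none then none
      else gA_loop mat_adj rest (some sommet)
    else gA_loop mat_adj rest entree

def get_entree_unique (mat_adj : List (List (Option Int))) : Option Int :=
  gA_loop mat_adj (PySem.List.pyRange 0 (mat_adj.length : Int) 1) none

-- ===== PORT B =====
-- inner loop: for j in range(n): if row[j] != CAR_VIDE: has_pred.add(j)
def gB_row (n : Int) (has_pred : PySem.Set Int) (row : List (Option Int)) : PySem.Set Int :=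
  (PySem.List.pyRange 0 n 1).foldl
    (fun s j => if PySem.List.pyGetD row j none != none then PySem.Set.add s j else s) has_pred

-- sources = [j for j in range(n) if j not in has_pred], with has_pred the row-major fold
def gB_sources (mat_adj : List (List (Option Int))) : List Int :=
  (PySem.List.pyRange 0 (mat_adj.length : Int) 1).filter
    (fun j => !(PySem.Set.contains (mat_adj.foldl (gB_row (mat_adj.length : Int)) PySem.Set.empty) j))

def get_entree_unique_alt (mat_adj : List (List (Option Int))) : Option Int :=
  if (gB_sources mat_adj).length == 1 then some (PySem.List.pyGetD (gB_sources mat_adj) 0 0) else none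

-- ===== PRECONDITION & SPEC =====
-- Pre_ excludes matrices with a row shorter than len(mat_adj): there A's column indexing raises
-- IndexError (except when an early 'return None' fires first, an accident of scan order); B raises too.
def Pre_get_entree_unique (mat_adj : List (List (Option Int))) : Prop :=
  ∀ row ∈ mat_adj, mat_adj.length ≤ row.length
instance (mat_adj : List (List (Option Int))) : Decidable (Pre_get_entree_unique mat_adj) := by
  unfold Pre_get_entree_unique; infer_instance
def pvWitness_get_entree_unique : List (List (Option Int)) :=
  [[none, some 1, none], [none, none, some 2], [none, some 3, none]]
def Spec_get_entree_unique (mat_adj : List (List (Option Int))) (out : Option Int) : Prop := out = get_entree_unique_alt mat_adj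
instance (mat_adj : List (List (Option Int))) (out : Option Int) : Decidable (Spec_get_entree_unique mat_adj out) := by unfold Spec_get_entree_unique; infer_instance

-- ===== CLAIM (what is proved, stated in full; the proofs are below) =====
def Claim_equal_get_entree_unique : Prop := ∀ (mat_adj : List (List (Option Int))), Dom_get_entree_unique mat_adj → Pre_get_entree_unique mat_adj → Spec_get_entree_unique mat_adj (get_entree_unique mat_adj)

-- ===== LEMMAS AND PROOFS =====

-- membership in the conditionally-built set (inner loop of B)
theorem mem_foldl_add_if {p : Int → Bool} (js : List Int) (s : PySem.Set Int) (y : Int) :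
    y ∈ js.foldl (fun s j => if p j then PySem.Set.add s j else s) s ↔
      y ∈ s ∨ (y ∈ js ∧ p y) := by
  induction js generalizing s with
  | nil => simp
  | cons j rest ih =>
    simp only [List.foldl_cons, ih, List.mem_cons]
    by_cases hpj : p j
    · simp only [hpj, if_pos, PySem.Set.mem_add]
      constructor
      · rintro ((h | rfl) | h)
        · exact Or.inl h
        · exact Or.inr ⟨Or.inl rfl, hpj⟩
        · exact Or.inr ⟨Or.inr h.1, h.2⟩
      · rintro (h | ⟨(rfl | h), hp⟩)
        · exact Or.inl (Or.inl h)
        · exact Or.inl (Or.inr rfl)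
        · exact Or.inr ⟨h, hp⟩
    · simp only [hpj, if_neg, Bool.false_eq_true, not_false_iff]
      constructor
      · rintro (h | h)
        · exact Or.inl h
        · exact Or.inr ⟨Or.inr h.1, h.2⟩
      · rintro (h | ⟨(rfl | h), hp⟩)
        · exact Or.inl h
        · exact (hpj hp).elim
        · exact Or.inr ⟨h, hp⟩

theorem mem_gB_row (n : Int) (s : PySem.Set Int) (row : List (Option Int)) (y : Int) :
    y ∈ gB_row n s row ↔
      y ∈ s ∨ (y ∈ PySem.List.pyRange 0 n 1 ∧ PySem.List.pyGetD row y none ≠ none) := by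
  unfold gB_row
  rw [mem_foldl_add_if (p := fun j => PySem.List.pyGetD row j none != none)]
  simp

theorem mem_hasPred (mat_adj : List (List (Option Int))) (n : Int) (s : PySem.Set Int) (y : Int) :
    y ∈ mat_adj.foldl (gB_row n) s ↔
      y ∈ s ∨ (y ∈ PySem.List.pyRange 0 n 1 ∧
        ∃ row ∈ mat_adj, PySem.List.pyGetD row y none ≠ none) := by
  induction mat_adj generalizing s with
  | nil => simp
  | cons row rest ih =>
    simp only [List.foldl_cons, ih, mem_gB_row, List.mem_cons]
    constructor
    · rintro ((h | ⟨hr, hp⟩) | ⟨hr, row', hm, hp⟩)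
      · exact Or.inl h
      · exact Or.inr ⟨hr, row, Or.inl rfl, hp⟩
      · exact Or.inr ⟨hr, row', Or.inr hm, hp⟩
    · rintro (h | ⟨hr, row', (rfl | hm), hp⟩)
      · exact Or.inl (Or.inl h)
      · exact Or.inl (Or.inr ⟨hr, hp⟩)
      · exact Or.inr ⟨hr, row', hm, hp⟩

-- pointwise agreement of the two membership/source tests
theorem cond_agree (mat_adj : List (List (Option Int))) (j : Int)
    (hj : j ∈ PySem.List.pyRange 0 (mat_adj.length : Int) 1) :
    gA_cond mat_adj j =
      !(PySem.Set.contains (mat_adj.foldl (gB_row (mat_adj.length : Int)) PySem.Set.empty) j) := by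
  have hmem : j ∈ mat_adj.foldl (gB_row (mat_adj.length : Int)) PySem.Set.empty ↔
      ∃ row ∈ mat_adj, PySem.List.pyGetD row j none ≠ none := by
    rw [mem_hasPred]
    simp [PySem.Set.empty, hj]
  have hcond : gA_cond mat_adj j = true ↔
      ∀ row ∈ mat_adj, PySem.List.pyGetD row j none = none := by
    unfold gA_cond
    rw [beq_iff_eq, ← List.length_map (f := fun col => PySem.List.pyGetD col j none) (as := mat_adj),
      List.count_eq_length]
    simp [eq_comm]
    constructor
    · intro h row hm
      exact (h _ row hm rfl).symm
    · intro h b x hx hb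
      rw [hb]
      exact (h x hx).symm
  by_cases h : ∃ row ∈ mat_adj, PySem.List.pyGetD row j none ≠ none
  · have h1 : gA_cond mat_adj j = false := by
      rcases h with ⟨row, hm, hp⟩
      by_contra hne
      have := hcond.mp (by revert hne; cases gA_cond mat_adj j <;> simp)
      exact hp (this row hm)
    have h2 : PySem.Set.contains (mat_adj.foldl (gB_row (mat_adj.length : Int)) PySem.Set.empty) j = true := by
      rw [PySem.Set.contains_iff, hmem]; exact h
    rw [h1, h2]; rfl
  · have h1 : gA_cond mat_adj j = true := by
      rw [hcond]
      intro row hm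
      by_contra hp
      exact h ⟨row, hm, hp⟩
    have h2 : PySem.Set.contains (mat_adj.foldl (gB_row (mat_adj.length : Int)) PySem.Set.empty) j = false := by
      rw [← Bool.not_eq_true, PySem.Set.contains_iff, hmem]; exact h
    rw [h1, h2]; rfl

-- A's loop, once an entry has been stored
theorem gA_loop_some (mat_adj : List (List (Option Int))) (js : List Int) (x : Int) :
    gA_loop mat_adj js (some x) =
      if js.filter (gA_cond mat_adj) = [] then some x else none := by
  induction js with
  | nil => simp [gA_loop]
  | cons j rest ih =>
    by_cases h : gA_cond mat_adj j
    · simp [gA_loop, h]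
    · simp [gA_loop, h, ih]

-- A's loop from the initial state, characterised by the filtered source list
theorem gA_loop_none (mat_adj : List (List (Option Int))) (js : List Int) :
    gA_loop mat_adj js none =
      match js.filter (gA_cond mat_adj) with
      | [x] => some x
      | _ => none := by
  induction js with
  | nil => simp [gA_loop]
  | cons j rest ih =>
    by_cases h : gA_cond mat_adj j
    · simp only [gA_loop, h, if_pos, ne_eq, not_true_eq_false, reduceIte,
        List.filter_cons, gA_loop_some]
      by_cases hrest : rest.filter (gA_cond mat_adj) = []
      · simp [hrest]
      · rcases List.exists_cons_of_ne_nil hrest with ⟨y, ys, hys⟩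
        simp [hys]
    · simp only [gA_loop, h, List.filter_cons]
      simpa [h] using ih

-- ===== VERDICT (by name: the statement is the Claim_ definition above) =====
theorem get_entree_unique_spec : Claim_equal_get_entree_unique := by
  intro mat_adj _hdom _hpre
  unfold Spec_get_entree_unique get_entree_unique get_entree_unique_alt
  rw [gA_loop_none]
  have hfil : (PySem.List.pyRange 0 (mat_adj.length : Int) 1).filter (gA_cond mat_adj) =
      gB_sources mat_adj := by
    unfold gB_sources
    apply List.filter_congr
    intro j hj
    exact cond_agree mat_adj j hj
  rw [hfil]
  rcases hcase : gB_sources mat_adj with _ | ⟨x, _ | ⟨y, ys⟩⟩ <;> simp [PySem.List.pyGetD]
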